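-- pv_equiv track=rewrite | github.com/pypi-data/pypi-mirror-382 | packages/nirs4all/nirs4all-0.2.0.tar.gz/nirs4all-0.2.0/nirs4all/dataset/dataset_config_parser.py | normalize_config_keys
-- ===== SOURCE A (Python) =====
-- from typing import Dict, Any
--
-- def normalize_config_keys(config: Dict[str, Any]) -> Dict[str, Any]:
--     """
--     Normalize dataset configuration keys to standard format.
--     Maps variations like 'x_train', 'X_train', 'Xtrain' to 'train_x'
--
--     Args:
--         config: Original configuration dictionary
--
--     Returns:
--         Normalized configuration with standardized keys
--     """
--     # Base patterns for each standard key
--     base_patterns = {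
--         'train_x': ['train_x', 'x_train', 'xtrain', 'trainx'],
--         'train_y': ['train_y', 'y_train', 'ytrain', 'trainy'],
--         'test_x': ['test_x', 'x_test', 'xtest', 'testx', 'val_x', 'x_val', 'xval', 'valx'],
--         'test_y': ['test_y', 'y_test', 'ytest', 'testy', 'val_y', 'y_val', 'yval', 'valy'],
--     }
--
--     # Build case-insensitive mapping
--     key_mappings = {}
--     for standard_key, variations in base_patterns.items():
--         for variation in variations:
--             # Add all case combinations
--             key_mappings[variation.lower()] = standard_key
--             key_mappings[variation.upper()] = standard_key
--             key_mappings[variation.capitalize()] = standard_key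
--             key_mappings[variation.title()] = standard_key
--
--     normalized_config = {}
--     for key, value in config.items():
--         normalized_key = key_mappings.get(key.lower(), key)
--         normalized_config[normalized_key] = value
--
--     return normalized_config
-- ===== SOURCE B (Python) =====
-- from typing import Dict, Any
--
-- def normalize_config_keys(config: Dict[str, Any]) -> Dict[str, Any]:
--     """Normalize dataset configuration keys to standard format (no precomputed
--     case-expanded index: scan the lowercase pattern lists per key)."""
--     base_patterns = {
--         'train_x': ['train_x', 'x_train', 'xtrain', 'trainx'],
--         'train_y': ['train_y', 'y_train', 'ytrain', 'trainy'],
--         'test_x': ['test_x', 'x_test', 'xtest', 'testx', 'val_x', 'x_val', 'xval', 'valx'],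
--         'test_y': ['test_y', 'y_test', 'ytest', 'testy', 'val_y', 'y_val', 'yval', 'valy'],
--     }
--     normalized_config = {}
--     for key, value in config.items():
--         lk = key.lower()
--         normalized_key = key
--         for standard_key, variations in base_patterns.items():
--             if lk in variations:
--                 normalized_key = standard_key
--                 break
--         normalized_config[normalized_key] = value
--     return normalized_config
-- ===== Notes on version B (the rewrite author's own statement) =====
-- stated objective: simpler
-- what changed: B drops A's precomputed case-expanded key_mappings index (built with lower/upper/capitalize/title variants) and instead, for each config key, scans the lowercase base_patterns lists for key.lower() directly, defaulting to the original key.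
import Mathlib
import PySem

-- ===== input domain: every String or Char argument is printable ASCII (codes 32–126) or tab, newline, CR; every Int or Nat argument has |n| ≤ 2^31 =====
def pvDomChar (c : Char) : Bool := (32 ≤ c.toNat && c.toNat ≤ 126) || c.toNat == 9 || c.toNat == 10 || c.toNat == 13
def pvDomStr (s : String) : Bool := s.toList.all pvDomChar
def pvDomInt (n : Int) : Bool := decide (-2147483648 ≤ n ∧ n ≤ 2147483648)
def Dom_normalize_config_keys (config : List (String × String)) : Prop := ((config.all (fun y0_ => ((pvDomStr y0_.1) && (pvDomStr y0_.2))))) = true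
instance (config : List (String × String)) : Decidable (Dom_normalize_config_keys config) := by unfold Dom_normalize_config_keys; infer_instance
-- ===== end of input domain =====

set_option maxRecDepth 20000

-- B replaces A's precomputed case-expanded key index by a direct scan of the lowercase
-- pattern lists per key (objective: simpler — no index-building pass, fewer moving parts).

-- ===== PORT A =====
-- str.capitalize(): first char uppercased, the rest lowered (exact on ASCII).
def pvCapitalize (s : String) : String :=
  match s.toList with
  | [] => ""
  | c :: rest => String.ofList (PySem.Chars.upperChar c :: PySem.Chars.lower rest)

-- str.title(): a letter following a non-alphabetic char (or at the start) is uppercased,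
-- other letters lowered (exact on ASCII; ported by hand, PySem has no title).
def pvTitleGo : List Char → Bool → List Char
  | [], _ => []
  | c :: rest, prevAlpha =>
      (if prevAlpha then PySem.Chars.lowerChar c else PySem.Chars.upperChar c)
        :: pvTitleGo rest (PySem.Chars.isalpha c)

def pvTitle (s : String) : String := String.ofList (pvTitleGo s.toList false)

def pvA_base_patterns : List (String × List String) :=
  [("train_x", ["train_x", "x_train", "xtrain", "trainx"]),
   ("train_y", ["train_y", "y_train", "ytrain", "trainy"]),
   ("test_x", ["test_x", "x_test", "xtest", "testx", "val_x", "x_val", "xval", "valx"]),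
   ("test_y", ["test_y", "y_test", "ytest", "testy", "val_y", "y_val", "yval", "valy"])]

-- the 'key_mappings' building loop of A (config-independent, hoisted to a helper)
def pvA_key_mappings : PySem.Dict String String :=
  pvA_base_patterns.foldl (fun km p =>
    p.2.foldl (fun km variation =>
      ((((km.insert (PySem.Str.lower variation) p.1).insert
          (PySem.Str.upper variation) p.1).insert
          (pvCapitalize variation) p.1).insert
          (pvTitle variation) p.1)) km) PySem.Dict.empty

-- the key transform of A's output loop: key_mappings.get(key.lower(), key)
def pvA_norm (key : String) : String :=
  pvA_key_mappings.getD (PySem.Str.lower key) key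

def normalize_config_keys (config : List (String × String)) : List (String × String) :=
  (config.foldl (fun d kv => d.insert (pvA_norm kv.1) kv.2) PySem.Dict.empty).items

-- ===== PORT B =====
-- B's inner loop with break: first standard key whose variation list contains key.lower()
-- (base_patterns inlined: only the lowercase variations, as in Source B)
def pvB_norm (key : String) : String :=
  match [("train_x", ["train_x", "x_train", "xtrain", "trainx"]),
         ("train_y", ["train_y", "y_train", "ytrain", "trainy"]),
         ("test_x", ["test_x", "x_test", "xtest", "testx", "val_x", "x_val", "xval", "valx"]),
         ("test_y", ["test_y", "y_test", "ytest", "testy", "val_y", "y_val", "yval", "valy"])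
        ].find? (fun p => p.2.contains (PySem.Str.lower key)) with
  | some p => p.1
  | none => key

def normalize_config_keys_alt (config : List (String × String)) : List (String × String) :=
  (config.foldl (fun d kv => d.insert (pvB_norm kv.1) kv.2) PySem.Dict.empty).items

-- ===== PRECONDITION & SPEC =====
def Spec_normalize_config_keys (config : List (String × String)) (out : List (String × String)) : Prop := out = normalize_config_keys_alt config
instance (config : List (String × String)) (out : List (String × String)) : Decidable (Spec_normalize_config_keys config out) := by unfold Spec_normalize_config_keys; infer_instance

-- ===== CLAIM (what is proved, stated in full; the proofs are below) =====
def Claim_equal_normalize_config_keys : Prop := ∀ (config : List (String × String)), Dom_normalize_config_keys config → Spec_normalize_config_keys config (normalize_config_keys config)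

-- ===== LEMMAS AND PROOFS =====

-- the 24 lowercase variations
def pvLC : List String := pvA_base_patterns.flatMap (·.2)

def pvUpperHead (s : String) : Bool :=
  match s.toList with
  | [] => false
  | c :: _ => PySem.Chars.isupper c

-- every key of A's key_mappings is a lowercase variation or starts with an uppercase letter
lemma km_keys_prop : ∀ p ∈ pvA_key_mappings.items, p.1 ∈ pvLC ∨ pvUpperHead p.1 = true := by
  decide

lemma toNat_ofNat' (n : Nat) (h : n < 0xd800) : (Char.ofNat n).toNat = n := by
  unfold Char.ofNat
  rw [dif_pos (by constructor; omega)]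
  rfl

lemma lowerChar_not_upper (c : Char) : PySem.Chars.isupper (PySem.Chars.lowerChar c) = false := by
  unfold PySem.Chars.lowerChar
  split_ifs with h
  · unfold PySem.Chars.isupper at h ⊢
    simp only [Bool.and_eq_true, decide_eq_true_eq] at h
    have h1 : 'A'.toNat ≤ c.toNat := h.1
    have h2 : c.toNat ≤ 'Z'.toNat := h.2
    have hA : 'A'.toNat = 65 := rfl
    have hZ : 'Z'.toNat = 90 := rfl
    have hv : c.toNat + 32 < 0xd800 := by omega
    simp only [Bool.and_eq_false_iff, decide_eq_false_iff_not]
    right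
    intro hle
    have h3 : (Char.ofNat (c.toNat + 32)).toNat ≤ 'Z'.toNat := hle
    rw [toNat_ofNat' _ hv] at h3
    omega
  · unfold PySem.Chars.isupper at h ⊢
    simpa using h

lemma upperHead_lower_false (k : String) : pvUpperHead (PySem.Str.lower k) = false := by
  unfold pvUpperHead
  cases hk : (PySem.Str.lower k).toList with
  | nil => rfl
  | cons c rest =>
      rw [PySem.Str.toList_lower] at hk
      unfold PySem.Chars.lower at hk
      cases hl : k.toList with
      | nil => rw [hl] at hk; simp at hk
      | cons a l =>
          rw [hl] at hk
          simp only [List.map_cons, List.cons.injEq] at hk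
          rw [← hk.1]
          exact lowerChar_not_upper a

lemma lower_ne_upperHead (k x : String) (hx : pvUpperHead x = true) :
    PySem.Str.lower k ≠ x := by
  intro h
  rw [← h, upperHead_lower_false] at hx
  exact Bool.false_ne_true hx

lemma norm_eq (key : String) : pvA_norm key = pvB_norm key := by
  by_cases hmem : PySem.Str.lower key ∈ pvLC
  · simp only [pvLC, pvA_base_patterns, List.flatMap_cons, List.flatMap_nil,
      List.append_nil, List.mem_append, List.mem_cons, List.not_mem_nil, or_false] at hmem
    unfold pvA_norm pvB_norm
    rcases hmem with (h|h|h|h)|(h|h|h|h)|(h|h|h|h|h|h|h|h)|(h|h|h|h|h|h|h|h) <;> rw [h] <;> rfl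
  · have hA : pvA_key_mappings.get? (PySem.Str.lower key) = none := by
      unfold PySem.Dict.get?
      rw [List.find?_eq_none.mpr]
      · rfl
      · intro p hp
        simp only [Bool.not_eq_true, beq_eq_false_iff_ne, ne_eq]
        intro hbeq
        rcases km_keys_prop p hp with hl | hu
        · rw [hbeq] at hl; exact hmem hl
        · exact lower_ne_upperHead key p.1 hu hbeq.symm
    have hB : ([("train_x", ["train_x", "x_train", "xtrain", "trainx"]),
         ("train_y", ["train_y", "y_train", "ytrain", "trainy"]),
         ("test_x", ["test_x", "x_test", "xtest", "testx", "val_x", "x_val", "xval", "valx"]),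
         ("test_y", ["test_y", "y_test", "ytest", "testy", "val_y", "y_val", "yval", "valy"])
        ] : List (String × List String)).find? (fun p => p.2.contains (PySem.Str.lower key)) = none := by
      rw [List.find?_eq_none.mpr]
      intro p hp
      simp only [Bool.not_eq_true]
      cases hc : p.2.contains (PySem.Str.lower key)
      · rfl
      · exfalso
        apply hmem
        unfold pvLC
        exact List.mem_flatMap.mpr ⟨p, hp, List.mem_of_elem_eq_true hc⟩
        -- (the inlined literal in pvB_norm is definitionally pvA_base_patterns)
    unfold pvA_norm pvB_norm PySem.Dict.getD
    rw [hA, hB]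
    rfl

lemma fold_eq (l : List (String × String)) (d : PySem.Dict String String) :
    l.foldl (fun d kv => d.insert (pvA_norm kv.1) kv.2) d
      = l.foldl (fun d kv => d.insert (pvB_norm kv.1) kv.2) d := by
  induction l generalizing d with
  | nil => rfl
  | cons kv rest ih =>
      simp only [List.foldl_cons]
      rw [norm_eq]
      exact ih _

-- ===== VERDICT (by name: the statement is the Claim_ definition above) =====
theorem normalize_config_keys_spec : Claim_equal_normalize_config_keys := by
  intro config _
  unfold Spec_normalize_config_keys normalize_config_keys normalize_config_keys_alt
  rw [fold_eq]
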